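-- pv_equiv track=rewrite | github.com/elados93/Google_Pizza_Hash_Code | pizza_code.py | all_shapes
-- ===== SOURCE A (Python) =====
-- def all_shapes(height, width, L, H, i, j):
--     max_ex_right = min(width - j, H)
--     max_ex_down = min(height - i, H)
--     all_op = []
--     for index in range(j, j + max_ex_right):
--         for index2 in range(i, i + max_ex_down):
--             if ((index - j + 1) * (index2 - i + 1) >= 2 * L) and ((index - j + 1) * (index2 - i + 1) <= H):
--                 all_op.append([index2, index])
--     return all_op
-- ===== SOURCE B (Python) =====
-- def all_shapes(height, width, L, H, i, j):
--     # Per width w, the valid heights h form one contiguous range, so no per-cell test is needed: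
--     # 2*L <= w*h <= H  <=>  ceil(2*L/w) <= h <= H//w; emit them directly.
--     max_ex_right = min(width - j, H)
--     max_ex_down = min(height - i, H)
--     out = []
--     for w in range(1, max_ex_right + 1):
--         lo = max(1, -((-2 * L) // w))
--         hi = min(max_ex_down, H // w)
--         for h in range(lo, hi + 1):
--             out.append([i + h - 1, j + w - 1])
--     return out
-- ===== Notes on version B (the rewrite author's own statement) =====
-- stated objective: alternative
-- what changed: Instead of scanning every (row, column) cell and testing the area condition per cell, B iterates only over widths and computes the contiguous valid height interval [ceil(2L/w), H//w] by floor/ceiling division, emitting those cells directly without any per-cell test; on outputs that fill most of the scanned rectangle the cost is the same.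
import Mathlib
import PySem

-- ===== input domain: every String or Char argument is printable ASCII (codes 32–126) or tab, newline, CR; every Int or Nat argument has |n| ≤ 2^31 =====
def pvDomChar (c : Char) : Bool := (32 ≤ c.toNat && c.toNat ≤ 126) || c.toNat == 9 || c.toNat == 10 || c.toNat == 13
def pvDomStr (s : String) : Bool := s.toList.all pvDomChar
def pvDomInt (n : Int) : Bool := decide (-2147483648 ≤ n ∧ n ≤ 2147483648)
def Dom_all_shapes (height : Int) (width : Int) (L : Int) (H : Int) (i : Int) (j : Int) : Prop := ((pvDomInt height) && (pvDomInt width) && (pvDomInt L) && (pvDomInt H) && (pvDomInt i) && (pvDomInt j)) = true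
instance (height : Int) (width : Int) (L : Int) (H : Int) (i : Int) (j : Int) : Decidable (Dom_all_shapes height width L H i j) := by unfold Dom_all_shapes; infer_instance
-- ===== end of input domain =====

-- B replaces A's per-cell scan-and-test over all (row, column) pairs by computing, per width,
-- the contiguous valid height range in closed form (ceiling/floor division) and emitting it directly (alternative algorithm).

-- ===== PORT A =====
def all_shapes (height : Int) (width : Int) (L : Int) (H : Int) (i : Int) (j : Int) : List (List Int) :=
  let max_ex_right := min (width - j) H
  let max_ex_down := min (height - i) H
  (PySem.List.pyRange j (j + max_ex_right) 1).foldl (fun all_op index =>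
    (PySem.List.pyRange i (i + max_ex_down) 1).foldl (fun all_op index2 =>
      if (index - j + 1) * (index2 - i + 1) ≥ 2 * L ∧ (index - j + 1) * (index2 - i + 1) ≤ H then
        all_op ++ [[index2, index]]
      else all_op) all_op) []

-- ===== PORT B =====
def all_shapes_alt (height : Int) (width : Int) (L : Int) (H : Int) (i : Int) (j : Int) : List (List Int) :=
  let max_ex_right := min (width - j) H
  let max_ex_down := min (height - i) H
  (PySem.List.pyRange 1 (max_ex_right + 1) 1).foldl (fun out w =>
    let lo := max 1 (-(PySem.Int.floordiv (-(2 * L)) w))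
    let hi := min max_ex_down (PySem.Int.floordiv H w)
    (PySem.List.pyRange lo (hi + 1) 1).foldl (fun out h =>
      out ++ [[i + h - 1, j + w - 1]]) out) []

-- ===== PRECONDITION & SPEC =====
def Spec_all_shapes (height : Int) (width : Int) (L : Int) (H : Int) (i : Int) (j : Int) (out : List (List Int)) : Prop := out = all_shapes_alt height width L H i j
instance (height : Int) (width : Int) (L : Int) (H : Int) (i : Int) (j : Int) (out : List (List Int)) : Decidable (Spec_all_shapes height width L H i j out) := by unfold Spec_all_shapes; infer_instance

-- ===== CLAIM (what is proved, stated in full; the proofs are below) =====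
def Claim_equal_all_shapes : Prop := ∀ (height : Int) (width : Int) (L : Int) (H : Int) (i : Int) (j : Int), Dom_all_shapes height width L H i j → Spec_all_shapes height width L H i j (all_shapes height width L H i j)

-- ===== LEMMAS AND PROOFS =====

-- a band filter of a unit-step range is the clamped range
theorem filter_pyRange_band (a b c d : Int) :
    (PySem.List.pyRange a b 1).filter (fun x => decide (c ≤ x ∧ x ≤ d)) =
      PySem.List.pyRange (max a c) (min b (d + 1)) 1 := by
  have hp1 : ((PySem.List.pyRange a b 1).filter (fun x => decide (c ≤ x ∧ x ≤ d))).Pairwise (· < ·) :=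
    (PySem.List.pairwise_lt_pyRange_one a b).sublist List.filter_sublist
  have hp2 := PySem.List.pairwise_lt_pyRange_one (max a c) (min b (d + 1))
  have hn1 : ((PySem.List.pyRange a b 1).filter (fun x => decide (c ≤ x ∧ x ≤ d))).Nodup :=
    hp1.imp (fun h => ne_of_lt h)
  have hn2 := hp2.imp (fun h => ne_of_lt h)
  have hperm : ((PySem.List.pyRange a b 1).filter (fun x => decide (c ≤ x ∧ x ≤ d))).Perm
      (PySem.List.pyRange (max a c) (min b (d + 1)) 1) := by
    rw [List.perm_ext_iff_of_nodup hn1 hn2]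
    intro x
    simp [List.mem_filter, PySem.List.mem_pyRange_one]
    omega
  exact hperm.eq_of_pairwise (fun x _ y _ h1 h2 => absurd h2 (lt_asymm h1)) hp1 hp2

theorem map_shift_pyRange (a b t : Int) :
    (PySem.List.pyRange a b 1).map (fun x => x + t) = PySem.List.pyRange (a + t) (b + t) 1 := by
  rw [PySem.List.pyRange_one, PySem.List.pyRange_one, List.map_map]
  have : (b + t - (a + t)) = b - a := by ring
  rw [this]
  exact List.map_congr_left (fun k _ => by simp [Function.comp]; ring)


theorem all_shapes_eq (height width L H i j : Int) :
    all_shapes height width L H i j = all_shapes_alt height width L H i j := by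
  unfold all_shapes all_shapes_alt
  simp only [PySem.List.foldl_append_ite, PySem.List.foldl_append_singleton_eq_map,
    PySem.List.foldl_append_eq_flatMap, List.nil_append]
  rw [PySem.List.pyRange_one j (j + min (width - j) H),
      PySem.List.pyRange_one 1 (min (width - j) H + 1)]
  have hlen : j + min (width - j) H - j = min (width - j) H + 1 - 1 := by ring
  rw [hlen, List.flatMap_map, List.flatMap_map]
  congr 1
  funext k
  have hw : (0:Int) < 1 + (k:Int) := by omega
  have key1 : ∀ q : Int, (-(PySem.Int.floordiv (-(2*L)) (1 + (k:Int))) ≤ q ↔ 2*L ≤ (1 + (k:Int))*q) := by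
    intro q
    rw [neg_le, PySem.Int.le_floordiv_iff_mul_le hw]
    constructor <;> intro h <;> nlinarith
  have key2 : ∀ q : Int, (q ≤ PySem.Int.floordiv H (1 + (k:Int)) ↔ (1 + (k:Int))*q ≤ H) := by
    intro q
    rw [PySem.Int.le_floordiv_iff_mul_le hw]
    constructor <;> intro h <;> nlinarith
  have hxw : j + (k:Int) - j + 1 = 1 + (k:Int) := by ring
  simp only [hxw]
  rw [List.filter_congr (l := PySem.List.pyRange i (i + min (height - i) H) 1)
    (q := fun x => decide ((i + (-(PySem.Int.floordiv (-(2*L)) (1 + (k:Int)))) - 1 ≤ x ∧ x ≤ i + PySem.Int.floordiv H (1 + (k:Int)) - 1)))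
    (fun x _ => by
      rw [decide_eq_decide, ge_iff_le, ← key1 (x - i + 1), ← key2 (x - i + 1)]
      generalize -(PySem.Int.floordiv (-(2*L)) (1 + (k:Int))) = A
      generalize PySem.Int.floordiv H (1 + (k:Int)) = B
      omega)]
  rw [filter_pyRange_band]
  have hsplit : (fun x_1 : Int => ([i + x_1 - 1, j + (1 + (k:Int)) - 1] : List Int))
      = (fun y : Int => ([y, j + (k:Int)] : List Int)) ∘ (fun y : Int => y + (i - 1)) := by
    funext y; simp [Function.comp]; constructor <;> ring
  rw [hsplit, ← List.map_map, map_shift_pyRange]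
  congr 2
  · generalize -(PySem.Int.floordiv (-(2*L)) (1 + (k:Int))) = A
    omega
  · generalize PySem.Int.floordiv H (1 + (k:Int)) = B
    omega

-- ===== VERDICT (by name: the statement is the Claim_ definition above) =====
theorem all_shapes_spec : Claim_equal_all_shapes := by
  intro height width L H i j _
  unfold Spec_all_shapes
  exact all_shapes_eq height width L H i j
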